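-- pv_equiv track=rewrite | github.com/TopsonArcana/Compro1 | 6310546058_Poomtum_ex6/data_processing.py | average_passes
-- ===== SOURCE A (Python) =====
-- def average_passes(players_data):
--     """Returns a tuple with four elements; the first, second, third, and fourth elements show the average number of passes made by defenders, midfielders, forwards, and goalkeepers, respectively
--     """
--     l = []
--     for role in ['defender', 'midfielder', 'forward', 'goalkeeper']:
--         temp = 0
--         for player in players_data:
--             if role == player['position']:
--                 temp += int(player['passes'])
--         l.append(temp)
--     return (l[0], l[1], l[2], l[3])
-- ===== SOURCE B (Python) =====
-- def average_passes(players_data):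
--     roles = ('defender', 'midfielder', 'forward', 'goalkeeper')
--     totals = {r: 0 for r in roles}
--     for player in players_data:
--         pos = player['position']
--         if pos in totals:
--             totals[pos] = totals[pos] + int(player['passes'])
--     return (totals['defender'], totals['midfielder'], totals['forward'], totals['goalkeeper'])
-- ===== Notes on version B (the rewrite author's own statement) =====
-- stated objective: idiomatic
-- what changed: One pass over players_data accumulating into a preset per-position dict instead of rescanning the whole list once per role.
import Mathlib
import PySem

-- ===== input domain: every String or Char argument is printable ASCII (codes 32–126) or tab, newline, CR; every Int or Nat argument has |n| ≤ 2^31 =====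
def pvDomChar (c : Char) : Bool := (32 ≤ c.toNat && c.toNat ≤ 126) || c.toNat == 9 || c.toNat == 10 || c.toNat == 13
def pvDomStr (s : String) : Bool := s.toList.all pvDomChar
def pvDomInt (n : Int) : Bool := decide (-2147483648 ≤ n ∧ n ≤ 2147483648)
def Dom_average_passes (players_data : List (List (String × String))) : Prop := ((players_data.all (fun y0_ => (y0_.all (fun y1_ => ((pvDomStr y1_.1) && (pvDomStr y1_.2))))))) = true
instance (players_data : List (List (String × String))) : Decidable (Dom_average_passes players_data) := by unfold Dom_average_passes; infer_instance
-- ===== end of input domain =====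

-- B replaces A's four rescans of the list (one per role) by a single pass keyed on a preset per-position dict; same return value.

-- ===== PORT A =====
-- player['position'] / player['passes'] via Dict lookup; defaults are never hit under Pre_.
def pvPos (player : List (String × String)) : String :=
  (PySem.Dict.mk player).getD "position" ""

def pvVal (player : List (String × String)) : Int :=
  (PySem.Int.ofStr? ((PySem.Dict.mk player).getD "passes" "")).getD 0

def pvRoleTemp (role : String) (players_data : List (List (String × String))) : Int :=
  players_data.foldl (fun temp player =>
    if role == pvPos player then temp + pvVal player else temp) 0

def average_passes (players_data : List (List (String × String))) : Int × Int × Int × Int :=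
  let l : List Int :=
    ["defender", "midfielder", "forward", "goalkeeper"].foldl
      (fun l role => l ++ [pvRoleTemp role players_data]) []
  (PySem.List.pyGetD l 0 0, PySem.List.pyGetD l 1 0, PySem.List.pyGetD l 2 0, PySem.List.pyGetD l 3 0)

-- ===== PORT B =====
def pvRoles : List String := ["defender", "midfielder", "forward", "goalkeeper"]

def pvStep (d : PySem.Dict String Int) (player : List (String × String)) : PySem.Dict String Int :=
  let pos := pvPos player
  if d.contains pos then d.modify pos 0 (· + pvVal player) else d

def average_passes_alt (players_data : List (List (String × String))) : Int × Int × Int × Int :=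
  let totals₀ : PySem.Dict String Int := PySem.Dict.ofList (pvRoles.map (fun r => (r, 0)))
  let totals := players_data.foldl pvStep totals₀
  (totals.getD "defender" 0, totals.getD "midfielder" 0, totals.getD "forward" 0, totals.getD "goalkeeper" 0)

-- ===== PRECONDITION & SPEC =====
-- Pre_ excludes exactly the inputs where A raises: a player without a 'position' key (KeyError), or a
-- player in one of the four roles whose 'passes' entry is absent or not int()-parsable (KeyError/ValueError).
def Pre_average_passes (players_data : List (List (String × String))) : Prop :=
  (players_data.all (fun player =>
    (PySem.Dict.mk player).contains "position" &&
    (!(pvRoles.contains (pvPos player)) ||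
      (PySem.Int.ofStr? ((PySem.Dict.mk player).getD "passes" "")).isSome))) = true

instance (players_data : List (List (String × String))) : Decidable (Pre_average_passes players_data) := by
  unfold Pre_average_passes; infer_instance

def pvWitness_average_passes : (List (List (String × String))) :=
  [[("position", "defender"), ("passes", "7")], [("position", "coach")]]

def Spec_average_passes (players_data : List (List (String × String))) (out : Int × Int × Int × Int) : Prop := out = average_passes_alt players_data
instance (players_data : List (List (String × String))) (out : Int × Int × Int × Int) : Decidable (Spec_average_passes players_data out) := by unfold Spec_average_passes; infer_instance

-- ===== CLAIM (what is proved, stated in full; the proofs are below) =====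
def Claim_equal_average_passes : Prop := ∀ (players_data : List (List (String × String))), Dom_average_passes players_data → Pre_average_passes players_data → Spec_average_passes players_data (average_passes players_data)

-- ===== LEMMAS AND PROOFS =====

theorem pvRoleTemp_gen (role : String) (l : List (List (String × String))) : ∀ a : Int,
    l.foldl (fun temp player => if role == pvPos player then temp + pvVal player else temp) a
      = a + (l.map (fun p => if role == pvPos p then pvVal p else 0)).sum := by
  induction l with
  | nil => simp
  | cons p l ih =>
      intro a
      simp only [List.foldl_cons, List.map_cons, List.sum_cons, ih]
      by_cases h : (role == pvPos p) = true
      · simp only [h, if_true]; ring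
      · rw [if_neg h, if_neg h]; ring

theorem pvRoleTemp_eq_sum (role : String) (players_data : List (List (String × String))) :
    pvRoleTemp role players_data
      = (players_data.map (fun p => if role == pvPos p then pvVal p else 0)).sum := by
  unfold pvRoleTemp
  rw [pvRoleTemp_gen]
  ring

theorem pvStep_contains (d : PySem.Dict String Int) (p : List (String × String)) (k : String) :
    (pvStep d p).contains k = d.contains k := by
  unfold pvStep
  simp only []
  by_cases h : d.contains (pvPos p) = true
  · simp only [h, if_true]
    rw [PySem.Dict.contains_modify]
    by_cases hk : k = pvPos p
    · subst hk; simp [h]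
    · simp [hk]
  · simp only [eq_false_of_ne_true h, Bool.false_eq_true, if_false]

theorem pvFold_getD (l : List (List (String × String))) (d : PySem.Dict String Int) (r : String)
    (hd : ∀ k, d.contains k = pvRoles.contains k) (hr : pvRoles.contains r = true) :
    (l.foldl pvStep d).getD r 0
      = d.getD r 0 + (l.map (fun p => if r == pvPos p then pvVal p else 0)).sum := by
  induction l generalizing d with
  | nil => simp
  | cons p l ih =>
      simp only [List.foldl_cons, List.map_cons, List.sum_cons]
      rw [ih (pvStep d p) (fun k => by rw [pvStep_contains]; exact hd k)]
      unfold pvStep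
      by_cases hc : d.contains (pvPos p) = true
      · simp only [hc, if_true]
        rw [PySem.Dict.getD_modify]
        by_cases he : r = pvPos p
        · subst he
          simp only [beq_self_eq_true, if_true]
          ring
        · have hb : (r == pvPos p) = false := by simp [he]
          simp only [if_neg he, hb, Bool.false_eq_true, if_false]
          ring
      · have hne : (r == pvPos p) = false := by
          have h2 := hd (pvPos p)
          rw [h2] at hc
          refine beq_eq_false_iff_ne.mpr ?_
          intro h; subst h; exact hc hr
        rw [if_neg hc, hne]
        simp only [Bool.false_eq_true, if_false]
        ring

theorem pvInit_contains (k : String) :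
    (PySem.Dict.ofList (pvRoles.map (fun r => (r, (0:Int))))).contains k = pvRoles.contains k := by
  simp only [pvRoles, List.map_cons, List.map_nil]
  simp [PySem.Dict.ofList, PySem.Dict.update, PySem.Dict.contains_insert]
  by_cases h1 : k = "defender" <;> by_cases h2 : k = "midfielder" <;>
    by_cases h3 : k = "forward" <;> by_cases h4 : k = "goalkeeper" <;> simp [h1, h2, h3, h4]

theorem pvInit_getD (r : String) (hr : r ∈ pvRoles) :
    (PySem.Dict.ofList (pvRoles.map (fun r => (r, (0:Int))))).getD r 0 = 0 := by
  fin_cases hr <;> decide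

-- ===== VERDICT (by name: the statement is the Claim_ definition above) =====
theorem average_passes_spec : Claim_equal_average_passes := by
  intro players_data _ _
  unfold Spec_average_passes average_passes average_passes_alt
  simp only [List.foldl_cons, List.foldl_nil, List.nil_append, List.cons_append]
  rw [pvFold_getD _ _ "defender" pvInit_contains (by decide),
      pvFold_getD _ _ "midfielder" pvInit_contains (by decide),
      pvFold_getD _ _ "forward" pvInit_contains (by decide),
      pvFold_getD _ _ "goalkeeper" pvInit_contains (by decide)]
  simp [pvRoleTemp_eq_sum, PySem.List.pyGetD]
  exact ⟨pvInit_getD _ (by decide), pvInit_getD _ (by decide),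
         pvInit_getD _ (by decide), pvInit_getD _ (by decide)⟩
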